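-- pv_equiv track=rewrite | github.com/rmfulton/AdventOfCode2023 | day11/sol2.py | expandLines
-- ===== SOURCE A (Python) =====
-- def expandLines(lines):
--     n = len(lines)
--     m = len(lines[0])
--     duplicationFactor = 2
--     rowDistance = [duplicationFactor for _ in range(n)]
--     columnDistance = [duplicationFactor for _ in range(m)]
--     for i in range(n):
--         for j in range(m):
--             if lines[i][j] == "#":
--                 rowDistance[i] = 1
--                 columnDistance[j] = 1
--     return getPrefixSum(rowDistance), getPrefixSum(columnDistance)
--
-- def getPrefixSum(arr):
--     prefixs = [0]
--     for element in arr: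
--         prefixs.append(prefixs[-1] + element)
--     return prefixs[1:]
-- ===== SOURCE B (Python) =====
-- def _cumsum(xs):
--     out = []
--     total = 0
--     for x in xs:
--         total += x
--         out.append(total)
--     return out
--
--
-- def expandLines(lines):
--     m = len(lines[0])
--     rowDistance = [1 if "#" in row[:m] else 2 for row in lines]
--     columnDistance = [1 if any(row[j] == "#" for row in lines) else 2
--                       for j in range(m)]
--     return _cumsum(rowDistance), _cumsum(columnDistance)
-- ===== Notes on version B (the rewrite author's own statement) =====
-- stated objective: simpler
-- what changed: Replaces A's imperative combined nested marking pass over two preallocated flag arrays with two direct comprehensions (per-row substring membership on row[:m], per-column any() scan) and a running-total accumulator instead of A's append-then-slice prefix-sum list; Pre_ excludes exactly the inputs where A raises IndexError (empty list, or a row shorter than the first row).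
import Mathlib
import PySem

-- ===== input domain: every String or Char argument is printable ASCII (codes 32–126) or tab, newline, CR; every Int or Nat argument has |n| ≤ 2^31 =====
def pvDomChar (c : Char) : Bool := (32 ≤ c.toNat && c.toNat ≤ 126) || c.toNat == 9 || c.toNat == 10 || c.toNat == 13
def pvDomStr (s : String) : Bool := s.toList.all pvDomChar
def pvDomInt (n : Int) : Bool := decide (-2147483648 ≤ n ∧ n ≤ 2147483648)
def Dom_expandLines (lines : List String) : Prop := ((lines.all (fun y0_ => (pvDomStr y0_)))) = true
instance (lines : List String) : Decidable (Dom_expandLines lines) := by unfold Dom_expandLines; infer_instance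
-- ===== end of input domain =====

-- B replaces A's combined nested flag-marking pass with two direct comprehensions and a
-- running-total prefix sum (objective: simpler).

-- ===== PORT A =====
def getPrefixSumA (arr : List Int) : List Int :=
  let prefixs := arr.foldl (fun ps element => ps ++ [PySem.List.pyGetD ps (-1) 0 + element]) [(0 : Int)]
  PySem.List.slice prefixs (some 1) none     -- prefixs[1:]

def expandLines (lines : List String) : List Int × List Int :=
  let n : Int := (lines.length : Int)
  let m : Int := ((PySem.List.pyGetD lines 0 "").toList.length : Int)   -- len(lines[0]); empty input excluded by Pre_
  let rowDistance : List Int := (PySem.List.pyRange 0 n 1).map (fun _ => 2)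
  let columnDistance : List Int := (PySem.List.pyRange 0 m 1).map (fun _ => 2)
  let final := (PySem.List.pyRange 0 n 1).foldl
    (fun (st : List Int × List Int) i =>
      (PySem.List.pyRange 0 m 1).foldl
        (fun (st : List Int × List Int) j =>
          if PySem.List.pyGetD (PySem.List.pyGetD lines i "").toList j ' ' = '#' then
            (st.1.set i.toNat 1, st.2.set j.toNat 1)   -- i, j come from range, so ≥ 0: toNat is exact
          else st)
        st)
    (rowDistance, columnDistance)
  (getPrefixSumA final.1, getPrefixSumA final.2)

-- ===== PORT B =====
def cumsumB (xs : List Int) : List Int :=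
  (xs.foldl (fun (p : List Int × Int) x => (p.1 ++ [p.2 + x], p.2 + x)) ([], 0)).1

def expandLines_alt (lines : List String) : List Int × List Int :=
  let m : Int := ((PySem.List.pyGetD lines 0 "").toList.length : Int)   -- len(lines[0]); empty input excluded by Pre_
  let rowDistance : List Int :=
    lines.map (fun row =>
      if PySem.Chars.isIn ['#'] (PySem.List.slice row.toList none (some m)) then 1 else 2)
  let columnDistance : List Int :=
    (PySem.List.pyRange 0 m 1).map (fun j =>
      if lines.any (fun row => PySem.List.pyGetD row.toList j ' ' == '#') then 1 else 2)
  (cumsumB rowDistance, cumsumB columnDistance)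

-- ===== PRECONDITION & SPEC =====
-- Pre_ excludes exactly the inputs on which A raises IndexError: the empty list
-- (lines[0]) and grids where some row is shorter than the first row (lines[i][j], j < m).
def Pre_expandLines (lines : List String) : Prop :=
  lines ≠ [] ∧ ∀ s ∈ lines, (lines.head?.getD "").toList.length ≤ s.toList.length
instance (lines : List String) : Decidable (Pre_expandLines lines) := by
  unfold Pre_expandLines; infer_instance

def pvWitness_expandLines : List String := ["#.", ".."]

def Spec_expandLines (lines : List String) (out : List Int × List Int) : Prop := out = expandLines_alt lines
instance (lines : List String) (out : List Int × List Int) : Decidable (Spec_expandLines lines out) := by unfold Spec_expandLines; infer_instance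

-- ===== CLAIM (what is proved, stated in full; the proofs are below) =====
def Claim_equal_expandLines : Prop := ∀ (lines : List String), Dom_expandLines lines → Pre_expandLines lines → Spec_expandLines lines (expandLines lines)

-- ===== LEMMAS AND PROOFS =====

/-- Running cumulative sums starting from total `t`. -/
def pvAccFrom (t : Int) : List Int → List Int
  | [] => []
  | x :: xs => (t + x) :: pvAccFrom (t + x) xs

theorem pvFoldA (xs : List Int) : ∀ (acc : List Int) (t : Int),
    xs.foldl (fun ps element => ps ++ [PySem.List.pyGetD ps (-1) 0 + element]) (acc ++ [t])
      = acc ++ t :: pvAccFrom t xs := by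
  induction xs with
  | nil => intro acc t; simp [pvAccFrom]
  | cons x xs ih =>
    intro acc t
    simp only [List.foldl_cons, PySem.List.pyGetD_neg_one_append_singleton]
    have h := ih (acc ++ [t]) (t + x)
    simpa [pvAccFrom] using h

theorem pvGetPrefixSumA_eq (arr : List Int) : getPrefixSumA arr = pvAccFrom 0 arr := by
  unfold getPrefixSumA
  have h := pvFoldA arr [] 0
  simp only [List.nil_append] at h
  rw [h, PySem.List.slice_from_one]
  rfl

theorem pvFoldB (xs : List Int) : ∀ (out : List Int) (t : Int),
    (xs.foldl (fun (p : List Int × Int) x => (p.1 ++ [p.2 + x], p.2 + x)) (out, t)).1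
      = out ++ pvAccFrom t xs := by
  induction xs with
  | nil => intro out t; simp [pvAccFrom]
  | cons x xs ih =>
    intro out t
    simp only [List.foldl_cons]
    have h := ih (out ++ [t + x]) (t + x)
    simpa [pvAccFrom] using h

theorem pvCumsumB_eq (arr : List Int) : cumsumB arr = pvAccFrom 0 arr := by
  unfold cumsumB
  have h := pvFoldB arr [] 0
  simpa using h

theorem pvFoldNested {α ι κ : Type} (l1 : List ι) (l2 : List κ) (F : α → ι → κ → α) (a : α) :
    l1.foldl (fun a i => l2.foldl (fun a j => F a i j) a) a
      = (l1.flatMap (fun i => l2.map (fun j => (i, j)))).foldl (fun a p => F a p.1 p.2) a := by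
  induction l1 generalizing a with
  | nil => rfl
  | cons i l1 ih => simp [List.foldl_append, List.foldl_map, ih]

theorem pvFoldPairSet {ι : Type} (l : List ι) (H : ι → Prop) [DecidablePred H]
    (p1 p2 : ι → Nat) (a b : List Int) :
    l.foldl (fun (st : List Int × List Int) x =>
        if H x then (st.1.set (p1 x) 1, st.2.set (p2 x) 1) else st) (a, b)
      = (l.foldl (fun a x => if H x then a.set (p1 x) 1 else a) a,
         l.foldl (fun b x => if H x then b.set (p2 x) 1 else b) b) := by
  induction l generalizing a b with
  | nil => rfl
  | cons x l ih => by_cases h : H x <;> simp [h, ih]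

theorem pvFoldSetLength {ι : Type} (l : List ι) (H : ι → Prop) [DecidablePred H]
    (pos : ι → Nat) (init : List Int) :
    (l.foldl (fun a x => if H x then a.set (pos x) 1 else a) init).length = init.length := by
  induction l generalizing init with
  | nil => rfl
  | cons x l ih => by_cases h : H x <;> simp [h, ih]

theorem pvFoldSetGet {ι : Type} (l : List ι) (H : ι → Prop) [DecidablePred H]
    (pos : ι → Nat) (init : List Int) (k : Nat) (hk : k < init.length) :
    (l.foldl (fun a x => if H x then a.set (pos x) 1 else a) init)[k]?
      = if (∃ x ∈ l, H x ∧ pos x = k) then some 1 else init[k]? := by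
  induction l generalizing init with
  | nil => simp
  | cons x l ih =>
    simp only [List.foldl_cons]
    by_cases h : H x
    · rw [if_pos h, ih (init.set (pos x) 1) (by simpa using hk)]
      by_cases hex : ∃ y ∈ l, H y ∧ pos y = k
      · simp [hex, h]
      · by_cases hpk : pos x = k
        · subst hpk
          simp [hex, h, hk]
        · simp [hex, h, hpk, List.getElem?_set_ne (by omega)]
    · rw [if_neg h, ih init hk]
      by_cases hex : ∃ y ∈ l, H y ∧ pos y = k
      · simp [hex, h]
      · simp [hex, h]

theorem pvMemTake {l : List Char} {m' : Nat} :
    '#' ∈ l.take m' ↔ ∃ j : Nat, j < m' ∧ l[j]? = some '#' := by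
  rw [List.mem_iff_getElem]
  constructor
  · rintro ⟨i, hi, he⟩
    have hlt := hi
    rw [List.length_take] at hlt
    refine ⟨i, by omega, ?_⟩
    rw [List.getElem_take] at he
    rw [List.getElem?_eq_getElem (by omega)]
    simpa using he
  · rintro ⟨j, hj, he⟩
    have hjl : j < l.length := by
      by_contra hc
      rw [List.getElem?_eq_none (by omega)] at he
      exact absurd he (by simp)
    refine ⟨j, by simp [List.length_take]; omega, ?_⟩
    rw [List.getElem_take]
    rw [List.getElem?_eq_getElem hjl] at he
    simpa using he

theorem pvRowCond (lines : List String) (m' : Nat) (k : Nat) (hk : k < lines.length)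
    (hlen : m' ≤ lines[k].toList.length) :
    (∃ p ∈ (PySem.List.pyRange 0 (lines.length : Int) 1).flatMap
        (fun i => (PySem.List.pyRange 0 (m' : Int) 1).map (fun j => (i, j))),
        PySem.List.pyGetD (PySem.List.pyGetD lines p.1 "").toList p.2 ' ' = '#' ∧ p.1.toNat = k)
    ↔ PySem.Chars.isIn ['#'] (PySem.List.slice lines[k].toList none (some (m' : Int))) = true := by
  rw [PySem.List.slice_to_natCast, PySem.Chars.isIn_iff_infix, List.singleton_infix_iff,
    pvMemTake]
  constructor
  · rintro ⟨p, hp, hchar, hpk⟩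
    rw [List.mem_flatMap] at hp
    obtain ⟨i, hi, hp2⟩ := hp
    rw [List.mem_map] at hp2
    obtain ⟨j, hj, rfl⟩ := hp2
    rw [PySem.List.mem_pyRange_one] at hi hj
    have hik : i = (k : Int) := by omega
    subst hik
    refine ⟨j.toNat, by omega, ?_⟩
    have h1 : PySem.List.pyGetD lines (k : Int) "" = lines[k] :=
      PySem.List.pyGetD_eq_getElem _ _ (by omega) (by exact_mod_cast hk)
    rw [h1] at hchar
    have h2 : PySem.List.pyGetD lines[k].toList j ' ' = lines[k].toList[j.toNat]'(by omega) :=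
      PySem.List.pyGetD_eq_getElem _ _ (by omega) (by omega)
    rw [h2] at hchar
    rw [List.getElem?_eq_getElem (show j.toNat < lines[k].toList.length by omega)]
    simpa using hchar
  · rintro ⟨j, hj, he⟩
    have hjl : j < lines[k].toList.length := by omega
    refine ⟨((k : Int), (j : Int)), ?_, ?_, by simp⟩
    · rw [List.mem_flatMap]
      refine ⟨(k : Int), by rw [PySem.List.mem_pyRange_one]; omega, ?_⟩
      rw [List.mem_map]
      exact ⟨(j : Int), by rw [PySem.List.mem_pyRange_one]; omega, rfl⟩
    · have h1 : PySem.List.pyGetD lines (k : Int) "" = lines[k] :=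
        PySem.List.pyGetD_eq_getElem _ _ (by omega) (by exact_mod_cast hk)
      rw [h1]
      show PySem.List.pyGetD lines[k].toList (j : Int) ' ' = '#'
      have h2 : PySem.List.pyGetD lines[k].toList (j : Int) ' ' = lines[k].toList[j]'(hjl) :=
        PySem.List.pyGetD_eq_getElem _ _ (by omega) (by exact_mod_cast hjl)
      rw [h2]
      rw [List.getElem?_eq_getElem hjl] at he
      simpa using he

theorem pvColCond (lines : List String) (m' : Nat) (k : Nat) (hk : k < m')
    (_hnil : lines ≠ []) :
    (∃ p ∈ (PySem.List.pyRange 0 (lines.length : Int) 1).flatMap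
        (fun i => (PySem.List.pyRange 0 (m' : Int) 1).map (fun j => (i, j))),
        PySem.List.pyGetD (PySem.List.pyGetD lines p.1 "").toList p.2 ' ' = '#' ∧ p.2.toNat = k)
    ↔ (lines.any (fun row => PySem.List.pyGetD row.toList (k : Int) ' ' == '#')) = true := by
  rw [List.any_eq_true]
  constructor
  · rintro ⟨p, hp, hchar, hpk⟩
    rw [List.mem_flatMap] at hp
    obtain ⟨i, hi, hp2⟩ := hp
    rw [List.mem_map] at hp2
    obtain ⟨j, hj, rfl⟩ := hp2
    rw [PySem.List.mem_pyRange_one] at hi hj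
    have hjk : j = (k : Int) := by omega
    subst hjk
    have hilt : i.toNat < lines.length := by omega
    have h1 : PySem.List.pyGetD lines i "" = lines[i.toNat]'(by omega) :=
      PySem.List.pyGetD_eq_getElem _ _ (by omega) (by omega)
    rw [h1] at hchar
    exact ⟨lines[i.toNat], List.getElem_mem hilt, by simpa using hchar⟩
  · rintro ⟨row, hrow, he⟩
    obtain ⟨i, hilt, hieq⟩ := List.mem_iff_getElem.mp hrow
    refine ⟨((i : Int), (k : Int)), ?_, ?_, by simp⟩
    · rw [List.mem_flatMap]
      refine ⟨(i : Int), by rw [PySem.List.mem_pyRange_one]; omega, ?_⟩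
      rw [List.mem_map]
      exact ⟨(k : Int), by rw [PySem.List.mem_pyRange_one]; omega, rfl⟩
    · have h1 : PySem.List.pyGetD lines (i : Int) "" = lines[i]'(hilt) :=
        PySem.List.pyGetD_eq_getElem _ _ (by omega) (by exact_mod_cast hilt)
      rw [h1, hieq]
      simpa using he

theorem expandLines_spec : Claim_equal_expandLines := by
  intro lines _ hpre
  obtain ⟨hne, hrect⟩ := hpre
  unfold Spec_expandLines
  cases lines with
  | nil => exact absurd rfl hne
  | cons r rest =>
    simp only [expandLines, expandLines_alt, PySem.List.pyGetD_zero_cons]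
    rw [pvFoldNested]
    rw [pvFoldPairSet _ (fun p : Int × Int => PySem.List.pyGetD (PySem.List.pyGetD (r :: rest) p.1 "").toList p.2 ' ' = '#') (fun p => p.1.toNat) (fun p => p.2.toNat)]
    rw [pvGetPrefixSumA_eq, pvGetPrefixSumA_eq, pvCumsumB_eq, pvCumsumB_eq]
    refine Prod.ext ?_ ?_ <;> simp only []
    · congr 1
      apply List.ext_getElem?
      intro k
      by_cases hk : k < (r :: rest).length
      · rw [pvFoldSetGet _ (fun p : Int × Int => PySem.List.pyGetD (PySem.List.pyGetD (r :: rest) p.1 "").toList p.2 ' ' = '#') (fun p => p.1.toNat) _ k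
          (by simpa [PySem.List.length_pyRange_one] using hk)]
        rw [PySem.List.getElem?_map_pyRange_zero (fun _ => (2 : Int)) _ k hk]
        rw [List.getElem?_map, List.getElem?_eq_getElem hk]
        simp only [Option.map_some]
        have hlen : r.toList.length ≤ (r :: rest)[k].toList.length := by
          simpa using hrect _ (List.getElem_mem hk)
        have hiff := pvRowCond (r :: rest) r.toList.length k hk hlen
        by_cases hc : PySem.Chars.isIn ['#']
            (PySem.List.slice (r :: rest)[k].toList none (some (r.toList.length : Int))) = true
        · rw [if_pos (hiff.mpr hc)]
          rw [if_pos hc]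
        · rw [if_neg (fun hx => hc (hiff.mp hx))]
          rw [if_neg hc]
      · rw [List.getElem?_eq_none, List.getElem?_eq_none]
        · simp only [List.length_map]; omega
        · rw [pvFoldSetLength]
          simp only [List.length_map, PySem.List.length_pyRange_one]
          omega
    · congr 1
      apply List.ext_getElem?
      intro k
      by_cases hk : k < r.toList.length
      · rw [pvFoldSetGet _ (fun p : Int × Int => PySem.List.pyGetD (PySem.List.pyGetD (r :: rest) p.1 "").toList p.2 ' ' = '#') (fun p => p.2.toNat) _ k
          (by simpa [PySem.List.length_pyRange_one] using hk)]
        rw [PySem.List.getElem?_map_pyRange_zero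
          (fun j => if ((r :: rest).any fun row => PySem.List.pyGetD row.toList j ' ' == '#') = true then (1 : Int) else 2) _ k hk]
        rw [PySem.List.getElem?_map_pyRange_zero (fun _ => (2 : Int)) _ k hk]
        have hiff := pvColCond (r :: rest) r.toList.length k hk (by simp)
        by_cases hc : ((r :: rest).any fun row => PySem.List.pyGetD row.toList (k : Int) ' ' == '#') = true
        · rw [if_pos (hiff.mpr hc)]
          rw [if_pos hc]
        · rw [if_neg (fun hx => hc (hiff.mp hx))]
          rw [if_neg hc]
      · rw [List.getElem?_eq_none, List.getElem?_eq_none]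
        · simp only [List.length_map, PySem.List.length_pyRange_one]; omega
        · rw [pvFoldSetLength]
          simp only [List.length_map, PySem.List.length_pyRange_one]
          omega
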